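-- pv_equiv track=rewrite | github.com/markushhgo/respa | kulkunen/drivers/abloy.py | remove_role_from_person
-- ===== SOURCE A (Python) =====
-- def remove_role_from_person(roles, role_name, start, end):
--     new_roles = roles.copy()
--     for i in range(len(new_roles)):
--         if new_roles[i]['name'] == role_name:
--             if new_roles[i]['validityStart'] == str(start) and new_roles[i]['validityEnd'] == str(end):
--                 del new_roles[i]
--                 break
--
--     return new_roles
-- ===== SOURCE B (Python) =====
-- def remove_role_from_person(roles, role_name, start, end):
--     # Right fold over the list (processed back-to-front): maintain the untouched
--     # suffix `orig` and the suffix-with-first-match-removed `res`.  When an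
--     # element matches, the first match of the current suffix is that element,
--     # so the answer for the suffix is the untouched tail `orig`.
--     s, e = str(start), str(end)
--     orig, res = [], []
--     for r in reversed(roles):
--         if r['name'] == role_name and r['validityStart'] == s and r['validityEnd'] == e:
--             res = orig
--         else:
--             res = [r] + res
--         orig = [r] + orig
--     return res
-- ===== Notes on version B (the rewrite author's own statement) =====
-- stated objective: alternative
-- what changed: B processes the list back-to-front as a right fold that carries two accumulators (the untouched suffix and the suffix with its first match removed), instead of A's forward index loop that copies, deletes in place and breaks.
import Mathlib
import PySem

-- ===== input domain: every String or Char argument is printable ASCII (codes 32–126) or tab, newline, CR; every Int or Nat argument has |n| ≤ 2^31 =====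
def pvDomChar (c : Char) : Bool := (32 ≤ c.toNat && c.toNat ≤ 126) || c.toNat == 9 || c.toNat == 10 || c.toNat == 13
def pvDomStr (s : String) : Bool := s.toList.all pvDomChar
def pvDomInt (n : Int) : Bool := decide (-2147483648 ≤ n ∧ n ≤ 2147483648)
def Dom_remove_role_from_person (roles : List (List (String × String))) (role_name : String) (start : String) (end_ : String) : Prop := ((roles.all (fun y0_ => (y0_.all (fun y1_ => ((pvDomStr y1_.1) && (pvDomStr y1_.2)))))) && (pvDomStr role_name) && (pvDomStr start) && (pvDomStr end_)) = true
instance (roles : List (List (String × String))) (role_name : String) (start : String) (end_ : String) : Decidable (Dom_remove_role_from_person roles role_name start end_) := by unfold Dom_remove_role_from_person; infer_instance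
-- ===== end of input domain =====

-- B traverses the list back-to-front (a right fold), maintaining the untouched suffix and the
-- suffix-with-first-match-removed, instead of A's forward copy-scan-delete-break loop.
-- Return values are identical; neither program mutates its argument.

-- ===== PORT A =====
-- A's loop copies, scans forward by index and on the first full match deletes that element and
-- breaks; ported as the obvious structural recursion rebuilding the list (dict access via
-- Dict.getD; Pre_ guarantees the accessed keys exist, matching Python's r['k']).
def remove_role_from_person (roles : List (List (String × String))) (role_name : String) (start : String) (end_ : String) : List (List (String × String)) :=
  match roles with
  | [] => []
  | r :: rest =>
    if PySem.Dict.getD ⟨r⟩ "name" "" == role_name then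
      if PySem.Dict.getD ⟨r⟩ "validityStart" "" == start && PySem.Dict.getD ⟨r⟩ "validityEnd" "" == end_ then
        rest  -- del new_roles[i]; break
      else
        r :: remove_role_from_person rest role_name start end_
    else
      r :: remove_role_from_person rest role_name start end_

-- ===== PORT B =====
-- one step of B's reversed loop: state = (orig = untouched suffix, res = answer for the suffix)
def pvBStep (role_name start end_ : String) (r : List (String × String))
    (st : List (List (String × String)) × List (List (String × String))) :
    List (List (String × String)) × List (List (String × String)) :=
  if PySem.Dict.getD ⟨r⟩ "name" "" == role_name &&
     PySem.Dict.getD ⟨r⟩ "validityStart" "" == start &&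
     PySem.Dict.getD ⟨r⟩ "validityEnd" "" == end_ then
    (r :: st.1, st.1)      -- res = orig
  else
    (r :: st.1, r :: st.2) -- res = [r] + res

def remove_role_from_person_alt (roles : List (List (String × String))) (role_name : String) (start : String) (end_ : String) : List (List (String × String)) :=
  (roles.foldr (pvBStep role_name start end_) ([], [])).2

-- ===== PRECONDITION & SPEC =====
-- Pre_ excludes inputs on which Python A raises KeyError: a role missing 'name', or a role whose
-- name equals role_name but missing a validity key.  (It requires this of every role — B reads
-- every element, A only up to the removed one; inputs bad only after the match are excluded too.)
def Pre_remove_role_from_person (roles : List (List (String × String))) (role_name : String) (start : String) (end_ : String) : Prop :=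
  ∀ r ∈ roles, (PySem.Dict.get? ⟨r⟩ "name").isSome ∧
    (PySem.Dict.getD ⟨r⟩ "name" "" = role_name →
      (PySem.Dict.get? ⟨r⟩ "validityStart").isSome ∧ (PySem.Dict.get? ⟨r⟩ "validityEnd").isSome)
instance (roles : List (List (String × String))) (role_name : String) (start : String) (end_ : String) : Decidable (Pre_remove_role_from_person roles role_name start end_) := by unfold Pre_remove_role_from_person; infer_instance

def pvWitness_remove_role_from_person : (List (List (String × String))) × String × String × String :=
  ([[("name", "admin"), ("validityStart", "2020-01-01"), ("validityEnd", "2020-12-31")],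
    [("name", "user"), ("validityStart", "2020-01-01"), ("validityEnd", "2020-12-31")]],
   "admin", "2020-01-01", "2020-12-31")

def Spec_remove_role_from_person (roles : List (List (String × String))) (role_name : String) (start : String) (end_ : String) (out : List (List (String × String))) : Prop := out = remove_role_from_person_alt roles role_name start end_
instance (roles : List (List (String × String))) (role_name : String) (start : String) (end_ : String) (out : List (List (String × String))) : Decidable (Spec_remove_role_from_person roles role_name start end_ out) := by unfold Spec_remove_role_from_person; infer_instance

-- ===== CLAIM (what is proved, stated in full; the proofs are below) =====
def Claim_equal_remove_role_from_person : Prop := ∀ (roles : List (List (String × String))) (role_name : String) (start : String) (end_ : String), Dom_remove_role_from_person roles role_name start end_ → Pre_remove_role_from_person roles role_name start end_ → Spec_remove_role_from_person roles role_name start end_ (remove_role_from_person roles role_name start end_)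

-- ===== LEMMAS AND PROOFS =====
-- Invariant of B's right fold: the first component is the untouched list, the second is exactly
-- A's result for it.
theorem foldr_bstep_eq (roles : List (List (String × String))) (role_name : String) (start : String) (end_ : String) :
    roles.foldr (pvBStep role_name start end_) ([], []) =
      (roles, remove_role_from_person roles role_name start end_) := by
  induction roles with
  | nil => simp [remove_role_from_person]
  | cons r rest ih =>
    simp only [List.foldr_cons, ih, pvBStep]
    by_cases h1 : (PySem.Dict.getD ⟨r⟩ "name" "" == role_name) = true
    · by_cases h2 : (PySem.Dict.getD ⟨r⟩ "validityStart" "" == start &&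
                     PySem.Dict.getD ⟨r⟩ "validityEnd" "" == end_) = true
      · obtain ⟨hb, hc⟩ := Bool.and_eq_true_iff.mp h2
        simp [remove_role_from_person, h1, hb, hc]
      · rcases Bool.and_eq_false_iff.mp (Bool.eq_false_iff.mpr h2) with hb | hc
        · simp [remove_role_from_person, h1, hb]
        · simp [remove_role_from_person, h1, hc]
    · simp [remove_role_from_person, Bool.eq_false_iff.mpr h1]

-- ===== VERDICT (by name: the statement is the Claim_ definition above) =====
theorem remove_role_from_person_spec : Claim_equal_remove_role_from_person := by
  intro roles role_name start end_ _ _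
  unfold Spec_remove_role_from_person remove_role_from_person_alt
  rw [foldr_bstep_eq]
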